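-- pv_equiv track=rewrite | github.com/ErikCalsson/binding_site_correlation | src/data_calculation.py | dic_mer_gen
-- ===== SOURCE A (Python) =====
-- from itertools import product
--
-- def dic_mer_gen(k_min, k_max):
--     # TODO ACGT not the only letters in fasta files!
--     seq = ['A', 'C', 'G', 'T']
--     tmp_dict = dict()
--     for i in range(k_min + 1, k_max + 1):
--         tmp_list = [''.join(k_mer) for k_mer in product(seq, repeat=i)]  # k-mer's length i
--         for j in tmp_list:
--             tmp_dict.update({j: 0})
--     return tmp_dict
-- ===== SOURCE B (Python) =====
-- def dic_mer_gen(k_min, k_max):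
--     # Incremental k-mer construction: extend a running list of strings one
--     # letter at a time instead of regenerating every length with itertools.product.
--     result = {}
--     if k_max <= k_min:
--         return result  # empty length range: nothing to generate
--     cur = ['']
--     for length in range(1, k_max + 1):
--         cur = [s + c for s in cur for c in 'ACGT']
--         if length > k_min:
--             for s in cur:
--                 result[s] = 0
--     return result
-- ===== Notes on version B (the rewrite author's own statement) =====
-- stated objective: alternative
-- what changed: Replaces per-length itertools.product regeneration by an incremental construction that maintains one running list of k-mers, extending each string by one letter per length and recording it once the length exceeds k_min.
-- intended difference: For k_min = -1 with k_max >= 0 A's range reaches repeat=0 and it returns a dict containing the length-0 empty string as a k-mer; B returns only the genuine k-mers of lengths 1..k_max, the intended value for a k-mer table. — e.g. on dic_mer_gen(-1, 1): A returns [("", 0), ("A", 0), ("C", 0), ("G", 0), ("T", 0)], B returns [("A", 0), ("C", 0), ("G", 0), ("T", 0)]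
import Mathlib
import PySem

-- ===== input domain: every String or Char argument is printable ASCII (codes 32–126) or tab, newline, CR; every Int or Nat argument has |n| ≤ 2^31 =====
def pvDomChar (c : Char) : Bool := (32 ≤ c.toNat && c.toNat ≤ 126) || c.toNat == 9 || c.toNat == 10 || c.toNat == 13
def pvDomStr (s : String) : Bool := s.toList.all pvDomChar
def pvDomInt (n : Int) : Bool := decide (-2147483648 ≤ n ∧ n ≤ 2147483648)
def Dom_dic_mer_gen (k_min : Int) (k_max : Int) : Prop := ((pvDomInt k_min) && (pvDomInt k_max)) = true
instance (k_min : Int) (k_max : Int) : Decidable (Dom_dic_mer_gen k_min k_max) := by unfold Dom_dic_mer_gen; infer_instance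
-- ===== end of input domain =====

-- B builds the k-mers incrementally (one running list, extended a letter per length)
-- instead of regenerating each length with itertools.product; equal return value except
-- at k_min = -1, where A additionally emits the length-0 empty string (see D_ below).

-- ===== PORT A =====
-- itertools.product(seq, repeat=n) for n ≥ 0, each tuple as a list of chars, product order.
def pvProd (seq : List Char) : Nat → List (List Char)
  | 0 => [[]]
  | n+1 => seq.flatMap (fun c => (pvProd seq n).map (fun l => c :: l))

-- `i.toNat`: Python raises ValueError for a negative repeat; those inputs are outside Pre_.
def dic_mer_gen (k_min : Int) (k_max : Int) : List (String × Int) :=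
  let seq : List Char := ['A', 'C', 'G', 'T']
  ((PySem.List.pyRange (k_min + 1) (k_max + 1) 1).foldl
    (fun tmp_dict i =>
      let tmp_list := (pvProd seq i.toNat).map (fun l => String.ofList l)
      tmp_list.foldl (fun d j => d.insert j 0) tmp_dict)
    (PySem.Dict.empty : PySem.Dict String Int)).items

-- ===== PORT B =====
def pvExtend (cur : List String) : List String :=
  cur.flatMap (fun s => ['A', 'C', 'G', 'T'].map (fun c => s.push c))

def dic_mer_gen_alt (k_min : Int) (k_max : Int) : List (String × Int) :=
  if k_max ≤ k_min then [] else
  (((PySem.List.pyRange 1 (k_max + 1) 1).foldl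
      (fun (st : PySem.Dict String Int × List String) length =>
        let cur := pvExtend st.2
        (if k_min < length then cur.foldl (fun d s => d.insert s 0) st.1 else st.1, cur))
      ((PySem.Dict.empty : PySem.Dict String Int), [""])).1).items

-- ===== PRECONDITION & SPEC =====
-- Pre_ excludes exactly the inputs where A raises ValueError: range(k_min+1, k_max+1)
-- then contains a negative i and product(seq, repeat=i) rejects it.
def Pre_dic_mer_gen (k_min : Int) (k_max : Int) : Prop := -1 ≤ k_min ∨ k_max ≤ k_min
instance (k_min : Int) (k_max : Int) : Decidable (Pre_dic_mer_gen k_min k_max) := by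
  unfold Pre_dic_mer_gen; infer_instance

def pvWitness_dic_mer_gen : Int × Int := (1, 3)

-- For k_min = -1 with k_max ≥ 0, A's range reaches repeat=0 and it returns a dict
-- containing the length-0 empty string; B returns only the genuine k-mers of lengths
-- 1..k_max, the intended value for a k-mer table.
def D_dic_mer_gen (k_min : Int) (k_max : Int) : Prop := k_min = -1 ∧ 0 ≤ k_max
instance (k_min : Int) (k_max : Int) : Decidable (D_dic_mer_gen k_min k_max) := by
  unfold D_dic_mer_gen; infer_instance

def Spec_dic_mer_gen (k_min : Int) (k_max : Int) (out : List (String × Int)) : Prop :=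
  ¬ D_dic_mer_gen k_min k_max → out = dic_mer_gen_alt k_min k_max
instance (k_min : Int) (k_max : Int) (out : List (String × Int)) : Decidable (Spec_dic_mer_gen k_min k_max out) := by
  unfold Spec_dic_mer_gen; infer_instance

def pvDiffWitness_dic_mer_gen : Int × Int := (-1, 1)
def pvDiffWitnessOut_dic_mer_gen : (List (String × Int)) × (List (String × Int)) :=
  ([("", 0), ("A", 0), ("C", 0), ("G", 0), ("T", 0)],
   [("A", 0), ("C", 0), ("G", 0), ("T", 0)])

-- ===== CLAIM (what is proved, stated in full; the proofs are below) =====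
def Claim_unchanged_dic_mer_gen : Prop := ∀ (k_min : Int) (k_max : Int), Dom_dic_mer_gen k_min k_max → Pre_dic_mer_gen k_min k_max → Spec_dic_mer_gen k_min k_max (dic_mer_gen k_min k_max)
def Claim_changed_dic_mer_gen : Prop := Dom_dic_mer_gen (pvDiffWitness_dic_mer_gen.1) (pvDiffWitness_dic_mer_gen.2) ∧ Pre_dic_mer_gen (pvDiffWitness_dic_mer_gen.1) (pvDiffWitness_dic_mer_gen.2) ∧ D_dic_mer_gen (pvDiffWitness_dic_mer_gen.1) (pvDiffWitness_dic_mer_gen.2) ∧ dic_mer_gen (pvDiffWitness_dic_mer_gen.1) (pvDiffWitness_dic_mer_gen.2) = pvDiffWitnessOut_dic_mer_gen.1 ∧ dic_mer_gen_alt (pvDiffWitness_dic_mer_gen.1) (pvDiffWitness_dic_mer_gen.2) = pvDiffWitnessOut_dic_mer_gen.2 ∧ pvDiffWitnessOut_dic_mer_gen.1 ≠ pvDiffWitnessOut_dic_mer_gen.2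
def Claim_exact_dic_mer_gen : Prop := ∀ (k_min : Int) (k_max : Int), Dom_dic_mer_gen k_min k_max → Pre_dic_mer_gen k_min k_max → D_dic_mer_gen k_min k_max → dic_mer_gen k_min k_max ≠ dic_mer_gen_alt k_min k_max

-- ===== LEMMAS AND PROOFS =====

-- all strings of length n over ACGT, in product (lexicographic) order
def allS (n : Nat) : List String := (pvProd ['A', 'C', 'G', 'T'] n).map String.ofList

theorem pvProd_snoc (seq : List Char) (n : Nat) :
    pvProd seq (n + 1) = (pvProd seq n).flatMap (fun l => seq.map (fun c => l ++ [c])) := by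
  induction n with
  | zero =>
    rw [show pvProd seq 1 = seq.flatMap (fun c => (pvProd seq 0).map (fun l => c :: l)) from rfl,
        show pvProd seq 0 = [[]] from rfl]
    simp [List.map_eq_flatMap]
  | succ n ih =>
    rw [show pvProd seq (n + 2) = seq.flatMap (fun c => (pvProd seq (n+1)).map (fun l => c :: l)) from rfl]
    conv_lhs => rw [ih]
    rw [show pvProd seq (n + 1) = seq.flatMap (fun c => (pvProd seq n).map (fun l => c :: l)) from rfl]
    simp [List.map_flatMap, List.flatMap_map, List.map_map, List.flatMap_assoc, Function.comp_def]

theorem ofList_push (l : List Char) (c : Char) :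
    (String.ofList l).push c = String.ofList (l ++ [c]) := by
  apply String.toList_inj.mp
  simp [String.toList_push]

theorem pvExtend_allS (n : Nat) : pvExtend (allS n) = allS (n + 1) := by
  unfold pvExtend allS
  rw [pvProd_snoc]
  simp [List.flatMap_map, List.map_flatMap, ofList_push]

theorem length_mem_pvProd (seq : List Char) (n : Nat) (l : List Char) (h : l ∈ pvProd seq n) :
    l.length = n := by
  induction n generalizing l with
  | zero => rw [show pvProd seq 0 = [[]] from rfl] at h; simp at h; simp [h]
  | succ n ih =>
    rw [show pvProd seq (n + 1) = seq.flatMap (fun c => (pvProd seq n).map (fun l => c :: l)) from rfl] at h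
    simp only [List.mem_flatMap, List.mem_map] at h
    obtain ⟨c, _, l', hl', rfl⟩ := h
    simp [ih l' hl']

theorem length_mem_allS (n : Nat) (s : String) (h : s ∈ allS n) : s.length = n := by
  simp only [allS, List.mem_map] at h
  obtain ⟨l, hl, rfl⟩ := h
  rw [String.length_ofList]
  exact length_mem_pvProd _ n l hl

theorem nodup_pvProd (seq : List Char) (hseq : seq.Nodup) (n : Nat) : (pvProd seq n).Nodup := by
  induction n with
  | zero => rw [show pvProd seq 0 = [[]] from rfl]; simp
  | succ n ih =>
    rw [show pvProd seq (n + 1) = seq.flatMap (fun c => (pvProd seq n).map (fun l => c :: l)) from rfl]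
    rw [List.nodup_flatMap]
    refine ⟨fun c _ => ih.map (fun a b h => by simpa using h), ?_⟩
    refine hseq.imp ?_
    intro c c' hne l hl hl'
    simp only [List.mem_map] at hl hl'
    obtain ⟨a, _, rfl⟩ := hl
    obtain ⟨b, _, hb⟩ := hl'
    exact (hne (by simpa using congrArg (fun t => t.headI) hb.symm)).elim

theorem nodup_allS (n : Nat) : (allS n).Nodup := by
  refine (nodup_pvProd _ (by decide) n).map ?_
  intro a b h
  simpa using congrArg String.toList h

-- a fold inserting a nodup list of fresh keys appends
theorem items_fold_insert (d : PySem.Dict String Int) (xs : List String)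
    (hnodup : xs.Nodup) (hfresh : ∀ s ∈ xs, d.contains s = false) :
    (xs.foldl (fun d j => d.insert j 0) d).items = d.items ++ xs.map (fun s => (s, 0)) := by
  have := PySem.Dict.items_foldl_insert_fresh (l := xs) (d := d)
    (k := fun s => s) (v := fun _ => (0 : Int)) hfresh (by simpa using hnodup)
  simpa using this

theorem keys_mem_items (d : PySem.Dict String Int) (s : String)
    (h : d.contains s = true) : ∃ v, (s, v) ∈ d.items := by
  rw [PySem.Dict.contains_iff_mem_keys] at h
  have : s ∈ d.items.map Prod.fst := by simpa [PySem.Dict.keys] using h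
  simp only [List.mem_map] at this
  obtain ⟨⟨a, v⟩, hm, rfl⟩ := this
  exact ⟨v, hm⟩

-- A-side loop: starting from nonneg a with all stored keys shorter than a, the loop appends
theorem loopA (k_max : Int) (n : Nat) : ∀ (a : Int), 0 ≤ a → (k_max + 1 - a).toNat = n →
    ∀ (d : PySem.Dict String Int), (∀ p ∈ d.items, (p.1.length : Int) < a) →
    ((PySem.List.pyRange a (k_max + 1) 1).foldl
      (fun tmp_dict i =>
        ((pvProd ['A','C','G','T'] i.toNat).map (fun l => String.ofList l)).foldl
          (fun d j => d.insert j 0) tmp_dict) d).items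
    = d.items ++ (PySem.List.pyRange a (k_max + 1) 1).flatMap
        (fun i => (allS i.toNat).map (fun s => (s, 0))) := by
  induction n with
  | zero =>
    intro a _ hn d _
    have hle : k_max + 1 ≤ a := by omega
    rw [PySem.List.pyRange_one_eq_nil hle]
    simp
  | succ n ih =>
    intro a ha hn d hd
    have hlt : a < k_max + 1 := by omega
    rw [PySem.List.pyRange_one_cons hlt]
    simp only [List.foldl_cons, List.flatMap_cons]
    have hfresh : ∀ s ∈ allS a.toNat, d.contains s = false := by
      intro s hs
      by_contra hc
      have hc' : d.contains s = true := by
        cases h : d.contains s with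
        | false => exact absurd h hc
        | true => rfl
      obtain ⟨v, hv⟩ := keys_mem_items d s hc'
      have := hd (s, v) hv
      have hl := length_mem_allS _ s hs
      simp only [hl] at this
      omega
    have hstep : ((allS a.toNat).foldl (fun d j => d.insert j 0) d).items
        = d.items ++ (allS a.toNat).map (fun s => (s, 0)) :=
      items_fold_insert d _ (nodup_allS _) hfresh
    have hd' : ∀ p ∈ ((allS a.toNat).foldl (fun d j => d.insert j 0) d).items,
        (p.1.length : Int) < a + 1 := by
      intro p hp
      have : p ∈ d.items ++ (allS a.toNat).map (fun s => (s, 0)) := by rw [← hstep]; exact hp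
      rcases List.mem_append.1 this with h | h
      · have := hd p h; omega
      · simp only [List.mem_map] at h
        obtain ⟨s, hs, rfl⟩ := h
        have := length_mem_allS _ s hs
        simp [this]; omega
    have := ih (a + 1) (by omega) (by omega)
      ((allS a.toNat).foldl (fun d j => d.insert j 0) d) hd'
    show ((PySem.List.pyRange (a+1) (k_max+1) 1).foldl _
        ((((pvProd ['A','C','G','T'] a.toNat).map (fun l => String.ofList l))).foldl
          (fun d j => d.insert j 0) d)).items = _
    rw [show ((pvProd ['A','C','G','T'] a.toNat).map (fun l => String.ofList l)) = allS a.toNat from rfl]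
    rw [this, hstep]
    simp [List.append_assoc]

-- B-side loop: cur = allS m at entry of iteration m+1; dict appends only for lengths > k_min
theorem loopB (k_min k_max : Int) (n : Nat) : ∀ (m : Nat), (k_max + 1 - ((m : Int) + 1)).toNat = n →
    ∀ (d : PySem.Dict String Int), (∀ p ∈ d.items, (p.1.length : Int) ≤ (m : Int)) →
    (((PySem.List.pyRange ((m : Int) + 1) (k_max + 1) 1).foldl
      (fun (st : PySem.Dict String Int × List String) length =>
        (if k_min < length then (pvExtend st.2).foldl (fun d s => d.insert s 0) st.1 else st.1,
         pvExtend st.2))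
      (d, allS m)).1).items
    = d.items ++ (PySem.List.pyRange ((m : Int) + 1) (k_max + 1) 1).flatMap
        (fun i => if k_min < i then (allS i.toNat).map (fun s => (s, 0)) else []) := by
  induction n with
  | zero =>
    intro m hn d _
    have hle : k_max + 1 ≤ (m : Int) + 1 := by omega
    rw [PySem.List.pyRange_one_eq_nil hle]
    simp
  | succ n ih =>
    intro m hn d hd
    have hlt : (m : Int) + 1 < k_max + 1 := by omega
    rw [PySem.List.pyRange_one_cons hlt]
    simp only [List.foldl_cons, List.flatMap_cons]
    rw [pvExtend_allS m]
    have hfresh : ∀ s ∈ allS (m + 1), d.contains s = false := by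
      intro s hs
      by_contra hc
      have hc' : d.contains s = true := by
        cases h : d.contains s with
        | false => exact absurd h hc
        | true => rfl
      obtain ⟨v, hv⟩ := keys_mem_items d s hc'
      have := hd (s, v) hv
      have hl := length_mem_allS _ s hs
      simp only [hl] at this
      push_cast at this
      omega
    have hstep : ((allS (m+1)).foldl (fun d s => d.insert s 0) d).items
        = d.items ++ (allS (m+1)).map (fun s => (s, 0)) :=
      items_fold_insert d _ (nodup_allS _) hfresh
    by_cases hk : k_min < (m : Int) + 1
    · rw [if_pos hk, if_pos hk]
      have hd' : ∀ p ∈ ((allS (m+1)).foldl (fun d s => d.insert s 0) d).items,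
          (p.1.length : Int) ≤ ((m + 1 : Nat) : Int) := by
        intro p hp
        have : p ∈ d.items ++ (allS (m+1)).map (fun s => (s, 0)) := by rw [← hstep]; exact hp
        rcases List.mem_append.1 this with h | h
        · have := hd p h; push_cast; omega
        · simp only [List.mem_map] at h
          obtain ⟨s, hs, rfl⟩ := h
          have := length_mem_allS _ s hs
          simp [this]
      have := ih (m + 1) (by push_cast; omega)
        ((allS (m+1)).foldl (fun d s => d.insert s 0) d) hd'
      push_cast at this
      rw [this, hstep]
      have : ((m : Int) + 1).toNat = m + 1 := by omega
      rw [this]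
      simp [List.append_assoc]
    · rw [if_neg hk, if_neg hk]
      have := ih (m + 1) (by push_cast; omega) d
        (by intro p hp; have := hd p hp; push_cast; omega)
      push_cast at this
      rw [this]
      simp

theorem flatMap_if_true (k_min : Int) (l : List Int)
    (h : ∀ i ∈ l, k_min < i) (f : Int → List (String × Int)) :
    l.flatMap (fun i => if k_min < i then f i else []) = l.flatMap f := by
  induction l with
  | nil => rfl
  | cons x t ih =>
    simp only [List.flatMap_cons, if_pos (h x (by simp))]
    rw [ih (fun i hi => h i (by simp [hi]))]

theorem flatMap_if_false (k_min : Int) (l : List Int)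
    (h : ∀ i ∈ l, ¬ k_min < i) (f : Int → List (String × Int)) :
    l.flatMap (fun i => if k_min < i then f i else []) = [] := by
  induction l with
  | nil => rfl
  | cons x t ih =>
    simp only [List.flatMap_cons, if_neg (h x (by simp))]
    exact ih (fun i hi => h i (by simp [hi]))

theorem allS_zero : allS 0 = [""] := by decide

-- the two ports, rewritten as explicit flatMaps over the length range
theorem dic_mer_gen_eq (k_min k_max : Int) (h : 0 ≤ k_min + 1) :
    dic_mer_gen k_min k_max
      = (PySem.List.pyRange (k_min + 1) (k_max + 1) 1).flatMap
          (fun i => (allS i.toNat).map (fun s => (s, 0))) := by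
  unfold dic_mer_gen
  have := loopA k_max (k_max + 1 - (k_min + 1)).toNat (k_min + 1) h rfl
    PySem.Dict.empty (by intro p hp; simp [PySem.Dict.empty] at hp)
  simpa [PySem.Dict.empty, PySem.Dict.items] using this

theorem dic_mer_gen_alt_eq (k_min k_max : Int) :
    dic_mer_gen_alt k_min k_max
      = if k_max ≤ k_min then []
        else (PySem.List.pyRange 1 (k_max + 1) 1).flatMap
          (fun i => if k_min < i then (allS i.toNat).map (fun s => (s, 0)) else []) := by
  unfold dic_mer_gen_alt
  split_ifs with hle
  · rfl
  have := loopB k_min k_max (k_max + 1 - 1).toNat 0 (by simp) PySem.Dict.empty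
    (by intro p hp; simp [PySem.Dict.empty] at hp)
  simp only [Nat.cast_zero, zero_add, allS_zero] at this
  simpa [PySem.Dict.empty, PySem.Dict.items] using this

-- ===== VERDICT (by name: the statement is the Claim_ definition above) =====
theorem dic_mer_gen_spec : Claim_unchanged_dic_mer_gen := by
  intro k_min k_max _ hpre
  unfold Pre_dic_mer_gen at hpre
  unfold Spec_dic_mer_gen
  intro hD
  unfold D_dic_mer_gen at hD
  rw [dic_mer_gen_alt_eq]
  by_cases hle : k_max ≤ k_min
  · -- empty length range: both sides are the empty dict
    unfold dic_mer_gen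
    rw [PySem.List.pyRange_one_eq_nil (by omega), if_pos hle]
    simp [PySem.Dict.empty]
  · -- k_min < k_max; Pre_ and ¬D_ force 0 ≤ k_min, and B's range splits at k_min + 1
    have hk0 : 0 ≤ k_min := by
      rcases hpre with h | h
      · rcases lt_or_ge k_min 0 with hneg | hpos
        · exact absurd ⟨by omega, by omega⟩ hD
        · exact hpos
      · omega
    rw [dic_mer_gen_eq k_min k_max (by omega), if_neg hle]
    rw [PySem.List.pyRange_one_append 1 (k_min + 1) (k_max + 1) (by omega) (by omega),
        List.flatMap_append]
    rw [flatMap_if_false k_min _ (by intro i hi; rw [PySem.List.mem_pyRange_one] at hi; omega)]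
    rw [flatMap_if_true k_min _ (by intro i hi; rw [PySem.List.mem_pyRange_one] at hi; omega)]
    simp

theorem dic_mer_gen_changed : Claim_changed_dic_mer_gen := by
  unfold Claim_changed_dic_mer_gen; decide

theorem dic_mer_gen_tight : Claim_exact_dic_mer_gen := by
  intro k_min k_max _ _ hD heq
  obtain ⟨hk, hmax⟩ := hD
  subst hk
  -- A's first entry is ("", 0); every entry of B has a key of positive length
  have hA : dic_mer_gen (-1) k_max
      = (PySem.List.pyRange 0 (k_max + 1) 1).flatMap
          (fun i => (allS i.toNat).map (fun s => (s, 0))) := by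
    simpa using dic_mer_gen_eq (-1) k_max (by omega)
  have hmem : (("", 0) : String × Int) ∈ dic_mer_gen (-1) k_max := by
    rw [hA, PySem.List.pyRange_one_cons (by omega)]
    simp [allS_zero]
  rw [heq, dic_mer_gen_alt_eq, if_neg (by omega)] at hmem
  simp only [List.mem_flatMap] at hmem
  obtain ⟨i, hi, hmemi⟩ := hmem
  rw [PySem.List.mem_pyRange_one] at hi
  split_ifs at hmemi with h
  · simp only [List.mem_map] at hmemi
    obtain ⟨s, hs, hps⟩ := hmemi
    have hlen := length_mem_allS _ s hs
    have : s = "" := congrArg Prod.fst hps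
    subst this
    simp [String.length] at hlen
    omega
  · simp at hmemi
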